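-- pv_equiv track=rewrite | github.com/LabCiscoLive2026/CiscoLive_2026_labguide | sna/Secure-Network-Analytics-labguide-CL2026/scripts/extract_sna_labv2_tasks.py | wrap_spl_queries
-- ===== SOURCE A (Python) =====
-- def wrap_spl_queries(text: str) -> str:
--     """Fence Splunk queries; collapse blank lines inside query to single newlines."""
--     lines = text.split('\n')
--     out: list[str] = []
--     i = 0
--     while i < len(lines):
--         line = lines[i]
--         out.append(line)
--         if line.strip() == 'Copy and paste the following query into the Splunk search bar:':
--             i += 1
--             if i < len(lines) and lines[i].strip() == '':
--                 out.append(lines[i])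
--                 i += 1
--             q_lines: list[str] = []
--             while i < len(lines):
--                 s = lines[i]
--                 if s.strip().startswith('Click the Search button'):
--                     break
--                 if s.strip() != '':
--                     q_lines.append(s.rstrip())
--                 i += 1
--             spl = '\n'.join(q_lines)
--             out.append('')
--             out.append('```spl')
--             out.append(spl)
--             out.append('```')
--             out.append('')
--             if i < len(lines):
--                 out.append(lines[i])
--             i += 1
--             continue
--         i += 1
--     return '\n'.join(out)
-- ===== SOURCE B (Python) =====
-- MARKER = 'Copy and paste the following query into the Splunk search bar:'
-- TERM = 'Click the Search button'
--
--
-- def wrap_spl_queries(text: str) -> str: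
--     """Fence Splunk queries; collapse blank lines inside query to single newlines."""
--     lines = text.split('\n')
--     out: list[str] = []
--     while True:
--         k = next((j for j, s in enumerate(lines) if s.strip() == MARKER), None)
--         if k is None:
--             out.extend(lines)
--             break
--         out.extend(lines[:k + 1])
--         rest = lines[k + 1:]
--         if rest and rest[0].strip() == '':
--             out.append(rest[0])
--             rest = rest[1:]
--         t = next((j for j, s in enumerate(rest)
--                   if s.strip().startswith(TERM)), len(rest))
--         out.extend(['', '```spl',
--                     '\n'.join(s.rstrip() for s in rest[:t] if s.strip()),
--                     '```', ''])
--         if t < len(rest):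
--             out.append(rest[t])
--         lines = rest[t + 1:]
--     return '\n'.join(out)
-- ===== Notes on version B (the rewrite author's own statement) =====
-- stated objective: alternative
-- what changed: A walks the lines one index at a time with a nested collecting while-loop; B works block-wise: it finds the next marker line, copies everything up to it in bulk, builds the fenced query with a single filter/map comprehension over the slice up to the terminator, and continues on the remaining suffix.
import Mathlib
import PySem

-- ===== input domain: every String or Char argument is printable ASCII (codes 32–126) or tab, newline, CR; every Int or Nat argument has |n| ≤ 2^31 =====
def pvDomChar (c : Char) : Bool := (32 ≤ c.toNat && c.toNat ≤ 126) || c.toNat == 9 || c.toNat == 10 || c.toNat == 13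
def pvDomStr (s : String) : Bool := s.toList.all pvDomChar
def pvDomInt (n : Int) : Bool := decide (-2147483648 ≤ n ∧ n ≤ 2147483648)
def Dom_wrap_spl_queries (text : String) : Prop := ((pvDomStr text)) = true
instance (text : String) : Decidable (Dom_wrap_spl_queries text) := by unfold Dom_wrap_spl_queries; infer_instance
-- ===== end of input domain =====

-- B rewrites A's line-at-a-time index loop as a block-based pass: find the next marker,
-- copy everything up to it in bulk, build the query with a filter/map comprehension over
-- the slice up to the terminator, and continue on the remaining suffix (objective: alternative).

def pvMarker : String := "Copy and paste the following query into the Splunk search bar:"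
def pvTerm : String := "Click the Search button"

-- ===== PORT A =====
-- inner 'while' of A: collect rstripped non-blank lines until a terminator line or EOF;
-- A tracks the position with an index i into lines — ported as the obvious structural
-- recursion over the remaining suffix, returning (q_lines, remaining suffix)
def pvAInner (rem : List String) (q : List String) : List String × List String :=
  match rem with
  | [] => (q, [])
  | s :: rest =>
    if PySem.Str.startswith (PySem.Str.strip s) pvTerm then (q, s :: rest)
    else if PySem.Str.strip s ≠ "" then pvAInner rest (q ++ [PySem.Str.rstrip s])
    else pvAInner rest q

-- 'if i < len(lines) and lines[i].strip() == ""' step of A: pass one blank line through;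
-- returns (updated out, remaining suffix)
def pvABlank (out : List String) (rem : List String) : List String × List String :=
  match rem with
  | r :: rs => if PySem.Str.strip r = "" then (out ++ [r], rs) else (out, r :: rs)
  | [] => (out, [])

-- outer 'while' of A, over the remaining suffix; the fuel argument only bounds the number
-- of iterations to make the jump to the post-terminator suffix structural (fuel = number
-- of lines suffices since every iteration consumes at least one line)
def pvAOuter : Nat → List String → List String → List String
  | 0, _, out => out
  | _ + 1, [], out => out
  | fuel + 1, line :: rest, out =>
      if PySem.Str.strip line = pvMarker then
        let p := pvABlank (out ++ [line]) rest
        let r := pvAInner p.2 []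
        let out2 := p.1 ++ ["", "```spl", PySem.Str.join "\n" r.1, "```", ""]
        -- 'if i < len(lines): out.append(lines[i])' then 'i += 1; continue'
        match r.2 with
        | [] => out2
        | x :: rest' => pvAOuter fuel rest' (out2 ++ [x])
      else pvAOuter fuel rest (out ++ [line])

def wrap_spl_queries (text : String) : String :=
  let lines := (PySem.Str.split? text "\n").getD []
  PySem.Str.join "\n" (pvAOuter lines.length lines [])

-- ===== PORT B =====
-- 'if rest and rest[0].strip() == ""' step of B: pass one blank line through
def pvBBlank (rest0 : List String) (out1 : List String) : List String × List String :=
  match rest0 with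
  | r :: rs => if PySem.Str.strip r = "" then (rs, out1 ++ [r]) else (rest0, out1)
  | [] => ([], out1)

-- one round of B's while loop: find the first marker line; if none, flush the rest;
-- otherwise copy through the marker in bulk, optionally pass one blank line, fence the
-- slice up to the terminator, and loop on the remaining suffix (fuel only bounds the
-- number of rounds; fuel = number of lines suffices, each round consumes ≥ 1 line)
def pvBLoop (fuel : Nat) (lines : List String) (out : List String) : List String :=
  match fuel with
  | 0 => out
  | fuel + 1 =>
    match lines.findIdx? (fun s => PySem.Str.strip s == pvMarker) with
    | none => out ++ lines
    | some k =>
      let pr := pvBBlank (lines.drop (k + 1)) (out ++ lines.take (k + 1))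
      let rest := pr.1
      let t := (rest.findIdx? (fun s => PySem.Str.startswith (PySem.Str.strip s) pvTerm)).getD rest.length
      let q := ((rest.take t).filter (fun s => PySem.Str.strip s != "")).map PySem.Str.rstrip
      let out2 := pr.2 ++ ["", "```spl", PySem.Str.join "\n" q, "```", ""]
      let out3 := if _h : t < rest.length then out2 ++ [rest[t]] else out2
      pvBLoop fuel (rest.drop (t + 1)) out3

def wrap_spl_queries_alt (text : String) : String :=
  let lines := (PySem.Str.split? text "\n").getD []
  PySem.Str.join "\n" (pvBLoop lines.length lines [])

-- ===== PRECONDITION & SPEC =====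
def Spec_wrap_spl_queries (text : String) (out : String) : Prop := out = wrap_spl_queries_alt text
instance (text : String) (out : String) : Decidable (Spec_wrap_spl_queries text out) := by unfold Spec_wrap_spl_queries; infer_instance

-- ===== CLAIM (what is proved, stated in full; the proofs are below) =====
def Claim_equal_wrap_spl_queries : Prop := ∀ (text : String), Dom_wrap_spl_queries text → Spec_wrap_spl_queries text (wrap_spl_queries text)

-- ===== LEMMAS AND PROOFS =====

-- terminator index of a suffix, as B computes it
def pvT (ls : List String) : Nat :=
  (ls.findIdx? (fun s => PySem.Str.startswith (PySem.Str.strip s) pvTerm)).getD ls.length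

-- query lines of a suffix, as B computes them
def pvQ (ls : List String) : List String :=
  ((ls.take (pvT ls)).filter (fun s => PySem.Str.strip s != "")).map PySem.Str.rstrip

theorem pvT_le (ls : List String) : pvT ls ≤ ls.length := by
  unfold pvT
  cases h : ls.findIdx? (fun s => PySem.Str.startswith (PySem.Str.strip s) pvTerm) with
  | none => simp
  | some k =>
    have := List.findIdx?_eq_some_iff_findIdx_eq.mp h
    simp
    omega

theorem pvT_cons (s : String) (ls : List String) :
    pvT (s :: ls) = if PySem.Str.startswith (PySem.Str.strip s) pvTerm then 0 else pvT ls + 1 := by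
  simp only [pvT, List.findIdx?_cons]
  split
  · simp
  · cases h : ls.findIdx? (fun s => PySem.Str.startswith (PySem.Str.strip s) pvTerm) <;> simp

theorem pvQ_cons (s : String) (ls : List String) :
    pvQ (s :: ls) = if PySem.Str.startswith (PySem.Str.strip s) pvTerm then []
      else if PySem.Str.strip s != "" then PySem.Str.rstrip s :: pvQ ls else pvQ ls := by
  simp only [pvQ, pvT_cons]
  split
  · simp
  · simp only [List.take_succ_cons, List.filter_cons]
    split <;> simp_all

-- A's inner loop computes B's filter/map over the slice up to the terminator,
-- and stops at the terminator suffix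
theorem pvAInner_spec (rem : List String) (q : List String) :
    pvAInner rem q = (q ++ pvQ rem, rem.drop (pvT rem)) := by
  induction rem generalizing q with
  | nil => simp [pvAInner, pvT, pvQ]
  | cons s rest ih =>
    rw [pvAInner, pvT_cons, pvQ_cons]
    by_cases hterm : PySem.Str.startswith (PySem.Str.strip s) pvTerm
    · simp_all
    · by_cases hblank : PySem.Str.strip s = ""
      · simp_all [show PySem.Chars.startswith [] pvTerm.toList = false from by decide]
      · simp_all

theorem pvBLoop_nil (fuel : Nat) (out : List String) : pvBLoop fuel [] out = out := by
  cases fuel <;> simp [pvBLoop]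

theorem pvBBlank_len (a b : List String) : (pvBBlank a b).1.length ≤ a.length := by
  cases a with
  | nil => simp [pvBBlank]
  | cons r rs => simp only [pvBBlank]; split <;> simp

-- fuel does not matter as long as it is at least the number of lines
theorem pvBLoop_fuel (f f' : Nat) (ls out : List String)
    (hf : ls.length ≤ f) (hf' : ls.length ≤ f') :
    pvBLoop f ls out = pvBLoop f' ls out := by
  induction f generalizing f' ls out with
  | zero =>
    have : ls = [] := by
      cases ls
      · rfl
      · simp at hf
    subst this
    simp [pvBLoop_nil]
  | succ f ih =>
    cases f' with
    | zero =>
      have : ls = [] := by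
        cases ls
        · rfl
        · simp at hf'
      subst this
      simp [pvBLoop_nil]
    | succ f' =>
      rw [pvBLoop, pvBLoop]
      cases hk : ls.findIdx? (fun s => PySem.Str.strip s == pvMarker) with
      | none => rfl
      | some k =>
        have hkl := (List.findIdx?_eq_some_iff_findIdx_eq.mp hk).1
        have hb := pvBBlank_len (ls.drop (k + 1)) (out ++ ls.take (k + 1))
        apply ih
        · simp only [List.length_drop] at *
          omega
        · simp only [List.length_drop] at *
          omega

-- B's loop absorbs a non-marker head line into the accumulator
theorem pvBLoop_cons_not_marker (f : Nat) (l : String) (ls out : List String)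
    (hf : ls.length ≤ f) (h : ¬ PySem.Str.strip l = pvMarker) :
    pvBLoop (f + 1) (l :: ls) out = pvBLoop f ls (out ++ [l]) := by
  rw [pvBLoop]
  rw [show (l :: ls).findIdx? (fun s => PySem.Str.strip s == pvMarker)
        = (ls.findIdx? (fun s => PySem.Str.strip s == pvMarker)).map (· + 1) by
      simp [List.findIdx?_cons, h]]
  cases hk : ls.findIdx? (fun s => PySem.Str.strip s == pvMarker) with
  | none =>
    cases f with
    | zero =>
      have : ls = [] := by
        cases ls
        · rfl
        · simp at hf
      subst this
      simp [pvBLoop_nil]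
    | succ f =>
      rw [pvBLoop]
      rw [hk]
      simp
  | some k =>
    have hkl := (List.findIdx?_eq_some_iff_findIdx_eq.mp hk).1
    obtain ⟨f', rfl⟩ : ∃ f', f = f' + 1 := ⟨f - 1, by omega⟩
    rw [pvBLoop]
    rw [hk]
    simp only [Option.map_some, List.take_succ_cons, List.drop_succ_cons, List.append_assoc,
      List.singleton_append]
    have hb := pvBBlank_len (ls.drop (k + 1)) (out ++ l :: ls.take (k + 1))
    apply pvBLoop_fuel
    · have := pvT_le (pvBBlank (ls.drop (k + 1)) (out ++ l :: ls.take (k + 1))).1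
      simp only [List.length_drop] at *
      omega
    · have := pvT_le (pvBBlank (ls.drop (k + 1)) (out ++ l :: ls.take (k + 1))).1
      simp only [List.length_drop] at *
      omega

-- main loop correspondence
theorem pvAOuter_eq (n : Nat) : ∀ (rem out : List String), rem.length ≤ n →
    pvAOuter n rem out = pvBLoop rem.length rem out := by
  induction n with
  | zero =>
    intro rem out hn
    have : rem = [] := by
      cases rem
      · rfl
      · simp at hn
    subst this
    simp [pvAOuter, pvBLoop_nil]
  | succ n ih =>
    intro rem out hn
    match rem with
    | [] => simp [pvAOuter, pvBLoop_nil]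
    | line :: rest =>
      rw [pvAOuter]
      by_cases hm : PySem.Str.strip line = pvMarker
      · rw [if_pos hm]
        dsimp only
        simp only [List.length_cons]
        rw [pvBLoop]
        rw [show (line :: rest).findIdx? (fun s => PySem.Str.strip s == pvMarker) = some 0 by
          simp [List.findIdx?_cons, hm]]
        simp only [List.take_succ_cons, List.take_zero, List.drop_succ_cons, List.drop_zero,
          List.append_assoc]
        -- align A's blank step with B's pvBBlank
        rw [show pvABlank (out ++ [line]) rest
              = ((pvBBlank rest (out ++ [line])).2, (pvBBlank rest (out ++ [line])).1) by
            cases rest with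
            | nil => simp [pvABlank, pvBBlank]
            | cons r rs =>
              simp only [pvABlank, pvBBlank]
              split <;> simp_all]
        rw [pvAInner_spec]
        dsimp only
        simp only [pvQ, pvT, List.nil_append]
        have hb := pvBBlank_len rest (out ++ [line])
        set rest1 := (pvBBlank rest (out ++ [line])).1 with hrest1
        set t := (rest1.findIdx? (fun s => PySem.Str.startswith (PySem.Str.strip s) pvTerm)).getD
          rest1.length with hdt
        have ht : t ≤ rest1.length := by
          have := pvT_le rest1
          simp only [pvT] at this
          rw [← hdt] at this
          exact this
        by_cases hcase : t < rest1.length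
        · rw [dif_pos hcase, List.drop_eq_getElem_cons hcase]
          dsimp only
          rw [ih _ _ (by simp only [List.length_drop]; simp at hn; omega)]
          apply pvBLoop_fuel
          · simp only [List.length_drop]
            omega
          · simp only [List.length_drop]
            simp at hn
            omega
        · rw [dif_neg hcase]
          rw [List.drop_of_length_le (by omega : rest1.length ≤ t)]
          dsimp only
          rw [List.drop_of_length_le (by omega : rest1.length ≤ t + 1), pvBLoop_nil]
      · rw [if_neg hm]
        rw [ih _ _ (by simp at hn ⊢; omega)]
        rw [show (line :: rest).length = rest.length + 1 from rfl]
        rw [pvBLoop_cons_not_marker _ _ _ _ (le_refl _) hm]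

-- ===== VERDICT (by name: the statement is the Claim_ definition above) =====
theorem wrap_spl_queries_spec : Claim_equal_wrap_spl_queries := by
  intro text _
  unfold Spec_wrap_spl_queries
  simp only [wrap_spl_queries, wrap_spl_queries_alt]
  rw [pvAOuter_eq _ _ _ (le_refl _)]
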